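-- pv_equiv track=rewrite | github.com/remis87/aoc2019 | day22.py | build_polynomial
-- ===== SOURCE A (Python) =====
-- def build_polynomial(functions, N):
--     a, b = 1, 0
--     for f in functions:
--         if f[0] == 0:
--             a *= -1
--             b = - 1 - b
--         elif f[0] == 1:
--             a = a * f[1]
--             b = b * f[1]
--         elif f[0] == 2:
--             b = b - f[1]
--     return a, b
-- ===== SOURCE B (Python) =====
-- def build_polynomial(functions, N):
--     # Divide and conquer: each instruction denotes an affine map x -> g_a*x + g_b;
--     # compose the two halves' total transforms (associativity makes this equal to
--     # the sequential left-to-right application).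
--     def affine(f):
--         op = f[0]
--         if op == 0:
--             return (-1, -1)
--         if op == 1:
--             return (f[1], 0)
--         if op == 2:
--             return (1, -f[1])
--         return (1, 0)
--
--     def compose(ops):
--         n = len(ops)
--         if n == 0:
--             return (1, 0)
--         if n == 1:
--             return affine(ops[0])
--         mid = n // 2
--         la, lb = compose(ops[:mid])
--         ra, rb = compose(ops[mid:])
--         return (ra * la, ra * lb + rb)
--
--     return compose(functions)
-- ===== Notes on version B (the rewrite author's own statement) =====
-- stated objective: alternative
-- what changed: B recursively splits the instruction list in halves and composes each half's total affine transform (divide and conquer, correct by associativity of affine composition), instead of A's single linear left-to-right accumulator pass.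
import Mathlib
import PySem

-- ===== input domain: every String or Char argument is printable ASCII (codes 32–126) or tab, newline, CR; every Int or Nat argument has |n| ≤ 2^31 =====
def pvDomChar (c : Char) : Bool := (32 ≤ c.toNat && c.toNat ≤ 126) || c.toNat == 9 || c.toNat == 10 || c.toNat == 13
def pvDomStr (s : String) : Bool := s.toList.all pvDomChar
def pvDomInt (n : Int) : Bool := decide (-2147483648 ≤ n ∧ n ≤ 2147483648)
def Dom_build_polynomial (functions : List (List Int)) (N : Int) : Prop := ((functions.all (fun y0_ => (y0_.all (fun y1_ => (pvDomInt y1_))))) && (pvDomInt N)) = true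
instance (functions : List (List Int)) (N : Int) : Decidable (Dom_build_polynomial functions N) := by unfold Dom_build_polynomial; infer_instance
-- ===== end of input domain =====

-- B composes the instructions' affine transforms by divide and conquer (split in halves,
-- compose the two halves' transforms; correct by associativity of affine composition),
-- instead of A's single linear left-to-right accumulator pass (objective: alternative).
-- Pre_ excludes exactly the inputs where Python A raises IndexError (f[0] or a needed f[1] missing);
-- both Pythons raise identically there.

-- ===== PORT A =====
-- f[0] / f[1] via pyGet?; the .getD 0 default is only reached outside Pre_ (Python raises there).
def build_polynomial (functions : List (List Int)) (N : Int) : Int × Int :=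
  functions.foldl (fun (ab : Int × Int) (f : List Int) =>
    let a := ab.1
    let b := ab.2
    if (PySem.List.pyGet? f 0).getD 0 = 0 then
      (a * (-1), -1 - b)
    else if (PySem.List.pyGet? f 0).getD 0 = 1 then
      (a * ((PySem.List.pyGet? f 1).getD 0), b * ((PySem.List.pyGet? f 1).getD 0))
    else if (PySem.List.pyGet? f 0).getD 0 = 2 then
      (a, b - ((PySem.List.pyGet? f 1).getD 0))
    else (a, b)) (1, 0)

-- ===== PORT B =====
-- per-instruction affine transform x -> g.1*x + g.2
def pvAffine (f : List Int) : Int × Int :=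
  let op := (PySem.List.pyGet? f 0).getD 0
  if op = 0 then (-1, -1)
  else if op = 1 then ((PySem.List.pyGet? f 1).getD 0, 0)
  else if op = 2 then (1, -((PySem.List.pyGet? f 1).getD 0))
  else (1, 0)

-- divide-and-conquer composition of the list's affine transforms (Source B's `compose`;
-- ops[:mid] / ops[mid:] are List.take / List.drop). The extra `fuel` argument is only
-- a structural-termination guard (fuel = ops.length always suffices; the 0-fuel branch
-- is unreachable): it changes no computed value.
def pvCompose (fuel : Nat) (ops : List (List Int)) : Int × Int :=
  match fuel, ops with
  | _, [] => (1, 0)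
  | _, [f] => pvAffine f
  | 0, _ => (1, 0)
  | fuel + 1, f1 :: f2 :: rest =>
    let mid := (f1 :: f2 :: rest).length / 2
    let l := pvCompose fuel ((f1 :: f2 :: rest).take mid)
    let r := pvCompose fuel ((f1 :: f2 :: rest).drop mid)
    (r.1 * l.1, r.1 * l.2 + r.2)

def build_polynomial_alt (functions : List (List Int)) (N : Int) : Int × Int :=
  pvCompose functions.length functions

-- ===== PRECONDITION & SPEC =====
-- Exactly the inputs where Python A returns: every instruction has an opcode, and ops 1/2 carry an argument.
def Pre_build_polynomial (functions : List (List Int)) (N : Int) : Prop :=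
  ∀ f ∈ functions, f ≠ [] ∧ ((f.headD 0 = 1 ∨ f.headD 0 = 2) → 2 ≤ f.length)
instance (functions : List (List Int)) (N : Int) : Decidable (Pre_build_polynomial functions N) := by unfold Pre_build_polynomial; infer_instance
def pvWitness_build_polynomial : List (List Int) × Int := ([[0], [1, 5], [2, 3], [7]], 10)

def Spec_build_polynomial (functions : List (List Int)) (N : Int) (out : Int × Int) : Prop := out = build_polynomial_alt functions N
instance (functions : List (List Int)) (N : Int) (out : Int × Int) : Decidable (Spec_build_polynomial functions N out) := by unfold Spec_build_polynomial; infer_instance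

-- ===== CLAIM (what is proved, stated in full; the proofs are below) =====
def Claim_equal_build_polynomial : Prop := ∀ (functions : List (List Int)) (N : Int), Dom_build_polynomial functions N → Pre_build_polynomial functions N → Spec_build_polynomial functions N (build_polynomial functions N)

-- ===== LEMMAS AND PROOFS =====

-- affine composition p ∘ q (apply q first, then p)
def pvComp (p q : Int × Int) : Int × Int := (p.1 * q.1, p.1 * q.2 + p.2)

-- A's step on f equals composing pvAffine f onto the accumulator (for any accumulator).
theorem pv_step_eq (ab : Int × Int) (f : List Int) :
    (let a := ab.1
     let b := ab.2
     if (PySem.List.pyGet? f 0).getD 0 = 0 then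
       (a * (-1), -1 - b)
     else if (PySem.List.pyGet? f 0).getD 0 = 1 then
       (a * ((PySem.List.pyGet? f 1).getD 0), b * ((PySem.List.pyGet? f 1).getD 0))
     else if (PySem.List.pyGet? f 0).getD 0 = 2 then
       (a, b - ((PySem.List.pyGet? f 1).getD 0))
     else (a, b)) = pvComp (pvAffine f) ab := by
  simp only [pvAffine, pvComp]
  split_ifs <;> simp [mul_comm, Int.sub_eq_add_neg] <;> try ring

-- A as a fold of pvComp over the affine transforms
def pvFoldComp (ops : List (List Int)) : Int × Int :=
  ops.foldl (fun ab f => pvComp (pvAffine f) ab) (1, 0)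

theorem pv_comp_id (p : Int × Int) : pvComp p (1, 0) = p := by
  simp [pvComp]

theorem pv_comp_assoc (p q r : Int × Int) :
    pvComp (pvComp p q) r = pvComp p (pvComp q r) := by
  simp only [pvComp, Prod.mk.injEq]; constructor <;> ring

-- folding from any starting accumulator z equals composing the whole list's transform onto z
theorem pv_fold_from (ops : List (List Int)) (z : Int × Int) :
    ops.foldl (fun ab f => pvComp (pvAffine f) ab) z = pvComp (pvFoldComp ops) z := by
  induction ops generalizing z with
  | nil => simp [pvFoldComp, pvComp]
  | cons x xs ih =>
    simp only [pvFoldComp, List.foldl_cons, pv_comp_id] at *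
    rw [ih (pvComp (pvAffine x) z), ih (pvAffine x), pv_comp_assoc]

theorem pv_fold_append (xs ys : List (List Int)) :
    pvFoldComp (xs ++ ys) = pvComp (pvFoldComp ys) (pvFoldComp xs) := by
  simp only [pvFoldComp, List.foldl_append]
  exact pv_fold_from ys _

-- divide-and-conquer composition equals the linear fold (whenever the fuel suffices)
theorem pv_compose_eq_fold (fuel : Nat) (ops : List (List Int)) (hf : ops.length ≤ fuel + 1) :
    pvCompose fuel ops = pvFoldComp ops := by
  induction fuel generalizing ops with
  | zero =>
    match ops, hf with
    | [], _ => simp [pvCompose, pvFoldComp]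
    | [f], _ => simp [pvCompose, pvFoldComp, pv_comp_id]
  | succ fuel ih =>
    match ops with
    | [] => simp [pvCompose, pvFoldComp]
    | [f] => simp [pvCompose, pvFoldComp, pv_comp_id]
    | f1 :: f2 :: rest =>
      rw [pvCompose]
      have hlen : (f1 :: f2 :: rest).length = rest.length + 2 := by simp
      have h := pv_fold_append ((f1 :: f2 :: rest).take ((f1 :: f2 :: rest).length / 2))
        ((f1 :: f2 :: rest).drop ((f1 :: f2 :: rest).length / 2))
      rw [List.take_append_drop] at h
      rw [h, ← ih _ (by simp [List.length_drop]; omega),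
        ← ih _ (by simp [List.length_take]; omega)]
      rfl

-- ===== VERDICT (by name: the statement is the Claim_ definition above) =====
theorem build_polynomial_spec : Claim_equal_build_polynomial := by
  intro functions N _ _
  unfold Spec_build_polynomial build_polynomial
  rw [build_polynomial_alt, pv_compose_eq_fold _ _ (by omega)]
  unfold pvFoldComp
  congr 1
  funext ab f
  exact pv_step_eq ab f
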